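-- pv_equiv track=rewrite | github.com/MohammedABBAKAR/Python34-snakefill | snakefill.py | snakefill
-- ===== SOURCE A (Python) =====
-- def snakefill(n):
--     area = n * n
--     length = 1
--     eats = 0
--
--     while length <= area:
--         length *= 2
--         eats += 1
--
--     return eats - 1
-- ===== SOURCE B (Python) =====
-- def snakefill(n):
--     return (n * n).bit_length() - 1
-- ===== Notes on version B (the rewrite author's own statement) =====
-- stated objective: idiomatic
-- what changed: Replaced the doubling while-loop and its counters with a closed form: the bit length of the squared area, minus one, which is the direct computation of the floor base-2 logarithm.
import Mathlib
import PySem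

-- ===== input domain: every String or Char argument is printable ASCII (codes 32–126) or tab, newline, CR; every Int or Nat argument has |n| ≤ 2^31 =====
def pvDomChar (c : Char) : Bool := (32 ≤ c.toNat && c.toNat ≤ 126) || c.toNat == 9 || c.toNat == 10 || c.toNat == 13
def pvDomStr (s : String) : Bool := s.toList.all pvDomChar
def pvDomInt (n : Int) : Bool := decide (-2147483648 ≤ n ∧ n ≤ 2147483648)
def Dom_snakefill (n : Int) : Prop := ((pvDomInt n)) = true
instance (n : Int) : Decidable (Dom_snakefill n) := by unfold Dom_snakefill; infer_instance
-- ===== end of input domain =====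

-- B replaces A's doubling while-loop with a closed-form bit_length computation (idiomatic; equal on all ints).

-- ===== PORT A =====
-- 'while length <= area: length *= 2; eats += 1' — all values are nonnegative ints,
-- carried as Nat for length/area (Python's are nonnegative here), eats as Int.
def snakefillLoop (area length : Nat) (eats : Int) (hl : 0 < length) : Int :=
  if length ≤ area then snakefillLoop area (length * 2) (eats + 1) (by omega) else eats
termination_by area + 1 - length
decreasing_by omega

def snakefill (n : Int) : Int :=
  snakefillLoop (n * n).toNat 1 0 (by omega) - 1

-- ===== PORT B =====
-- Source B: return (n * n).bit_length() - 1; int.bit_length is Nat.size.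
def snakefill_alt (n : Int) : Int :=
  ((n * n).toNat.size : Int) - 1

-- ===== PRECONDITION & SPEC =====
def Spec_snakefill (n : Int) (out : Int) : Prop := out = snakefill_alt n
instance (n : Int) (out : Int) : Decidable (Spec_snakefill n out) := by unfold Spec_snakefill; infer_instance

-- ===== CLAIM (what is proved, stated in full; the proofs are below) =====
def Claim_equal_snakefill : Prop := ∀ (n : Int), Dom_snakefill n → Spec_snakefill n (snakefill n)

-- ===== LEMMAS AND PROOFS =====
theorem size_div2_succ (m : Nat) (h : m ≠ 0) : m.size = (m / 2).size + 1 := by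
  apply le_antisymm
  · rw [Nat.size_le, pow_succ]
    have h1 : m / 2 < 2 ^ (m / 2).size := Nat.lt_size_self _
    omega
  · have ht : 0 < m.size := Nat.size_pos.mpr (Nat.pos_of_ne_zero h)
    have h1 : m < 2 ^ m.size := Nat.lt_size_self _
    have h2 : (m / 2).size ≤ m.size - 1 := by
      rw [Nat.size_le]
      have : 2 ^ m.size = 2 * 2 ^ (m.size - 1) := by
        rw [← pow_succ']; congr 1; omega
      omega
    omega

theorem snakefillLoop_eq (area : Nat) : ∀ (length : Nat) (eats : Int) (hl : 0 < length),
    snakefillLoop area length eats hl = eats + ((area / length).size : Int) := by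
  intro length eats hl
  rw [snakefillLoop]
  split
  · rename_i hle
    rw [snakefillLoop_eq area (length * 2) (eats + 1)]
    have hq : area / length ≠ 0 := by
      intro h0
      have := Nat.div_eq_zero_iff.mp h0
      omega
    have : area / (length * 2) = area / length / 2 := by
      rw [Nat.div_div_eq_div_mul]
    rw [this, size_div2_succ _ hq]
    push_cast
    ring
  · rename_i hgt
    have : area / length = 0 := Nat.div_eq_of_lt (by omega)
    simp [this]
termination_by length => area + 1 - length
decreasing_by omega

-- ===== VERDICT (by name: the statement is the Claim_ definition above) =====
theorem snakefill_spec : Claim_equal_snakefill := by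
  intro n _
  unfold Spec_snakefill snakefill snakefill_alt
  rw [snakefillLoop_eq]
  simp
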